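-- pv_equiv track=rewrite | github.com/AlehAkbashev/test_from_yandex | mob_dev/lecture.py | make_dict_schedule
-- ===== SOURCE A (Python) =====
-- def make_dict_schedule(my_schedule):
--     my_dict = {}
--     for i in range(len(my_schedule)):
--         if my_schedule[i][0] not in my_dict.keys():
--             my_dict[my_schedule[i][0]] = [my_schedule[i][1]]
--         else:
--             my_dict[my_schedule[i][0]].append(my_schedule[i][1])
--     return my_dict
-- ===== SOURCE B (Python) =====
-- def make_dict_schedule(my_schedule):
--     keys = dict.fromkeys(pair[0] for pair in my_schedule)
--     return {key: [pair[1] for pair in my_schedule if pair[0] == key] for key in keys}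
-- ===== Notes on version B (the rewrite author's own statement) =====
-- stated objective: alternative
-- what changed: A's single accumulating pass that grows one dict entry at a time is replaced by an index-then-nested-scan shape: first collect the distinct keys in first-appearance order, then build each group with one full scan of the schedule per key.
import Mathlib
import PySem

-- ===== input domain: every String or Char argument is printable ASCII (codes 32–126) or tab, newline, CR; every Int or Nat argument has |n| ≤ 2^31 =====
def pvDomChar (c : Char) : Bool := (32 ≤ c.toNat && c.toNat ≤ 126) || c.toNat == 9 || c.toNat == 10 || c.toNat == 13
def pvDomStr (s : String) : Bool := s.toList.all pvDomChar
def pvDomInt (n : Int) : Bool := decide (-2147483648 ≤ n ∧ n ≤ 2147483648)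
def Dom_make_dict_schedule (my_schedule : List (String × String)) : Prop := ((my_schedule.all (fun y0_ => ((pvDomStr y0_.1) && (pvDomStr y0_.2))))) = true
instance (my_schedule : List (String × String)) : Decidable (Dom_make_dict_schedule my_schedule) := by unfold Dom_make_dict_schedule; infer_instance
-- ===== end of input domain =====

-- B replaces A's single accumulating-dict pass by an index-then-nested-scan shape
-- (distinct keys in first-appearance order, then one scan of the schedule per key);
-- same result, different decomposition (objective: alternative).

-- ===== PORT A =====
-- loop body of A: if key unseen, start a one-element list; else append to its list
def pvStepA (my_dict : PySem.Dict String (List String)) (pair : String × String) :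
    PySem.Dict String (List String) :=
  if !(my_dict.contains pair.1) then
    my_dict.insert pair.1 [pair.2]
  else
    my_dict.modify pair.1 [] (fun l => l ++ [pair.2])   -- my_dict[k].append(v)

def make_dict_schedule (my_schedule : List (String × String)) : List (String × List String) :=
  (List.foldl
    (fun my_dict i => pvStepA my_dict (PySem.List.pyGetD my_schedule i ("", "")))
    PySem.Dict.empty
    (PySem.List.pyRange 0 (PySem.List.len my_schedule))).items

-- ===== PORT B =====
def make_dict_schedule_alt (my_schedule : List (String × String)) : List (String × List String) :=
  (PySem.List.dedup (my_schedule.map (fun pair => pair.1))).map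
    (fun key => (key, (my_schedule.filter (fun pair => pair.1 == key)).map (fun pair => pair.2)))

-- ===== PRECONDITION & SPEC =====
def Spec_make_dict_schedule (my_schedule : List (String × String)) (out : List (String × List String)) : Prop := out = make_dict_schedule_alt my_schedule
instance (my_schedule : List (String × String)) (out : List (String × List String)) : Decidable (Spec_make_dict_schedule my_schedule out) := by unfold Spec_make_dict_schedule; infer_instance

-- ===== CLAIM (what is proved, stated in full; the proofs are below) =====
def Claim_equal_make_dict_schedule : Prop := ∀ (my_schedule : List (String × String)), Dom_make_dict_schedule my_schedule → Spec_make_dict_schedule my_schedule (make_dict_schedule my_schedule)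

-- ===== LEMMAS AND PROOFS =====

lemma find?_beq_self_of_mem (K : List String) (x : String) (h : x ∈ K) :
    K.find? (fun k => k == x) = some x := by
  induction K with
  | nil => cases h
  | cons a t ih =>
    by_cases ha : a = x
    · subst ha; simp [List.find?]
    · have hb : (a == x) = false := beq_eq_false_iff_ne.mpr ha
      have hx : x ∈ t := by
        rcases List.mem_cons.mp h with h1 | h1
        · exact absurd h1.symm ha
        · exact h1
      simp [List.find?, hb, ih hx]

lemma foldA_items (s : List (String × String)) :
    (List.foldl pvStepA PySem.Dict.empty s).items
      = (PySem.List.dedup (s.map (fun pair => pair.1))).map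
          (fun key => (key, (s.filter (fun pair => pair.1 == key)).map (fun pair => pair.2))) := by
  induction s using List.reverseRecOn with
  | nil => rfl
  | append_singleton s p ih =>
    rw [List.foldl_append, List.foldl_cons, List.foldl_nil]
    simp only [List.map_append, List.map_cons, List.map_nil, PySem.List.dedup_eq_ofList] at ih ⊢
    rw [PySem.Set.ofList_append_singleton]
    by_cases hmem : p.1 ∈ s.map (fun pair => pair.1)
    · -- key already present: A appends to its list, B's filter for that key gains p
      have hK : p.1 ∈ PySem.Set.ofList (s.map (fun pair => pair.1)) :=
        (PySem.Set.mem_ofList _ _).mpr hmem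
      rw [PySem.Set.add_of_mem hK]
      have hcont : (List.foldl pvStepA PySem.Dict.empty s).contains p.1 = true := by
        simp only [PySem.Dict.contains, ih, List.any_map, List.any_eq_true]
        exact ⟨p.1, hK, by simp⟩
      have hget : (List.foldl pvStepA PySem.Dict.empty s).getD p.1 []
          = (s.filter (fun pair => pair.1 == p.1)).map (fun pair => pair.2) := by
        simp only [PySem.Dict.getD, PySem.Dict.get?, ih, List.find?_map]
        rw [show ((fun (q : String × List String) => q.1 == p.1) ∘
              (fun key => (key, (s.filter (fun pair => pair.1 == key)).map (fun pair => pair.2))))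
            = (fun k => k == p.1) from rfl]
        rw [find?_beq_self_of_mem _ _ hK]
        rfl
      simp only [pvStepA, Bool.not_true, Bool.false_eq_true, if_false,
        PySem.Dict.modify, PySem.Dict.insert, hcont, if_true, hget, ih, List.map_map]
      apply List.map_congr_left
      intro k hk
      by_cases hkp : k = p.1
      · subst hkp
        simp [List.filter_append, List.filter]
      · have : (k == p.1) = false := by simp [hkp]
        simp [Function.comp, this, List.filter_append, List.filter,
          show (p.1 == k) = false by simp [Ne.symm hkp]]
    · -- new key: A appends a fresh entry, B's dedup gains p.1 at the end
      have hK : p.1 ∉ PySem.Set.ofList (s.map (fun pair => pair.1)) := by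
        rw [PySem.Set.mem_ofList]; exact hmem
      rw [PySem.Set.add_of_not_mem hK]
      have hcont : (List.foldl pvStepA PySem.Dict.empty s).contains p.1 = false := by
        simp only [PySem.Dict.contains, ih, List.any_map]
        rw [List.any_eq_false]
        intro k hkK
        simp only [Function.comp_apply, beq_iff_eq]
        exact fun h => hK (h ▸ hkK)
      simp only [pvStepA, Bool.not_false, if_true, PySem.Dict.insert, hcont,
        Bool.false_eq_true, if_false, ih, List.map_append, List.map_cons, List.map_nil]
      congr 1
      · apply List.map_congr_left
        intro k hk
        have hkp : p.1 ≠ k := fun h => hK (h ▸ hk)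
        simp [List.filter_append, List.filter, beq_eq_false_iff_ne.mpr hkp]
      · have hfil : s.filter (fun pair => pair.1 == p.1) = [] := by
          rw [List.filter_eq_nil_iff]
          intro q hq
          simp only [beq_iff_eq]
          exact fun h => hmem (h ▸ List.mem_map_of_mem hq)
        simp [List.filter_append, List.filter, hfil]

-- ===== VERDICT (by name: the statement is the Claim_ definition above) =====
theorem make_dict_schedule_spec : Claim_equal_make_dict_schedule := by
  intro my_schedule _
  show make_dict_schedule my_schedule = make_dict_schedule_alt my_schedule
  unfold make_dict_schedule make_dict_schedule_alt
  rw [PySem.List.foldl_pyRange_zero_pyGetD my_schedule ("", "") pvStepA PySem.Dict.empty]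
  exact foldA_items my_schedule
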